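-- pv_equiv track=rewrite | github.com/dominicmkennedy/synth-xfer | synth_xfer/cli/max_precise.py | _parse_kb_str
-- ===== SOURCE A (Python) =====
-- def _parse_kb_str(arg: str) -> tuple[int, int]:
--     known_z, known_o = 0, 0
--
--     for ch in arg:
--         if ch == "0":
--             known_z |= 1
--         elif ch == "1":
--             known_o |= 1
--         known_z <<= 1
--         known_o <<= 1
--
--     known_z >>= 1
--     known_o >>= 1
--     return known_z, known_o
-- ===== SOURCE B (Python) =====
-- def _parse_kb_str(arg: str) -> tuple[int, int]:
--     n = len(arg)
--     known_z = sum(1 << (n - 1 - i) for i, ch in enumerate(arg) if ch == "0")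
--     known_o = sum(1 << (n - 1 - i) for i, ch in enumerate(arg) if ch == "1")
--     return known_z, known_o
-- ===== Notes on version B (the rewrite author's own statement) =====
-- stated objective: alternative
-- what changed: Replaces the stateful shift-accumulator loop (or-in a bit, shift both masks each step, final right-shift) with two direct positional-weight sums: each '0'/'1' at index i contributes 2^(n-1-i) to its mask.
import Mathlib
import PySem

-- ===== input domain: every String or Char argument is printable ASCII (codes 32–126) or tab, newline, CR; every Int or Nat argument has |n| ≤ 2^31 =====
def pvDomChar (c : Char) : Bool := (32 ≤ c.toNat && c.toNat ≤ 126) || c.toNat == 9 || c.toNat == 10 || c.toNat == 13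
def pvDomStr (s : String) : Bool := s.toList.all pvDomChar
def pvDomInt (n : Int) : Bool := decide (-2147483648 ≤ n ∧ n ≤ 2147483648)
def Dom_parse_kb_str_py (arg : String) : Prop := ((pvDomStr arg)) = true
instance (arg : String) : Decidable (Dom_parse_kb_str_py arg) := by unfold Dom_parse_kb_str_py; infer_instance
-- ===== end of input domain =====

-- B replaces A's shift-accumulator loop with two positional-weight sums (same O(n) cost; objective: alternative algorithm).

-- ===== PORT A =====
-- loop over the chars with state (known_z, known_o); Python's `x |= 1` is PySem.Int.bor,
-- `x <<= 1` / `x >>= 1` are Lean's Int <<< / >>> (exact per PYSEM.md).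
def pvStepA (st : Int × Int) (ch : Char) : Int × Int :=
  let st' :=
    if ch = '0' then (PySem.Int.bor st.1 1, st.2)
    else if ch = '1' then (st.1, PySem.Int.bor st.2 1)
    else st
  (st'.1 <<< (1 : Nat), st'.2 <<< (1 : Nat))

def parse_kb_str_py (arg : String) : Int × Int :=
  let st := arg.toList.foldl pvStepA (0, 0)
  (st.1 >>> (1 : Nat), st.2 >>> (1 : Nat))

-- ===== PORT B =====
-- sum over enumerate(arg) of 1 << (n-1-i) for the matching chars; the shift amount
-- n-1-i is ≥ 0 for every enumerated index i, so `.toNat` is exact there.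
def parse_kb_str_py_alt (arg : String) : Int × Int :=
  let n := PySem.Str.len arg
  let known_z := (((PySem.List.enumerate arg.toList).filter (fun p => p.2 == '0')).map
      (fun p => (1 : Int) <<< (n - 1 - p.1).toNat)).sum
  let known_o := (((PySem.List.enumerate arg.toList).filter (fun p => p.2 == '1')).map
      (fun p => (1 : Int) <<< (n - 1 - p.1).toNat)).sum
  (known_z, known_o)

-- ===== PRECONDITION & SPEC =====
def Spec_parse_kb_str_py (arg : String) (out : Int × Int) : Prop := out = parse_kb_str_py_alt arg
instance (arg : String) (out : Int × Int) : Decidable (Spec_parse_kb_str_py arg out) := by unfold Spec_parse_kb_str_py; infer_instance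

-- ===== CLAIM (what is proved, stated in full; the proofs are below) =====
def Claim_equal_parse_kb_str_py : Prop := ∀ (arg : String), Dom_parse_kb_str_py arg → Spec_parse_kb_str_py arg (parse_kb_str_py arg)

-- ===== LEMMAS AND PROOFS =====

-- the value both programs compute for one target char: big-endian 0/1 weight sum
def pvVal (c : Char) : List Char → Int
  | [] => 0
  | d :: t => (if d = c then 1 else 0) * 2 ^ t.length + pvVal c t

lemma two_mul_lor_one (a : Nat) : 2 * a ||| 1 = 2 * a + 1 := by
  have h := Nat.lor_bit false a true 0
  simpa [Nat.bit_val] using h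

lemma bor_two_mul_one (a : Int) (ha : 0 ≤ a) :
    PySem.Int.bor (2 * a) 1 = 2 * a + 1 := by
  rw [PySem.Int.bor_of_nonneg (by omega) (by omega)]
  have h1 : (2 * a).toNat = 2 * a.toNat := by omega
  have h2 : (1 : Int).toNat = 1 := rfl
  rw [h1, h2, two_mul_lor_one]
  omega

lemma foldA (l : List Char) (a b : Int) (ha : 0 ≤ a) (hb : 0 ≤ b) :
    l.foldl pvStepA (2 * a, 2 * b)
    = (2 * (a * 2 ^ l.length + pvVal '0' l), 2 * (b * 2 ^ l.length + pvVal '1' l)) := by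
  induction l generalizing a b with
  | nil => simp [pvVal]
  | cons c t ih =>
    rw [List.foldl_cons]
    by_cases h0 : c = '0'
    · subst h0
      have hstep : pvStepA (2 * a, 2 * b) '0' = (2 * (2 * a + 1), 2 * (2 * b)) := by
        simp only [pvStepA]
        simp only [if_true]
        simp only [Int.shiftLeft_eq, pow_one, bor_two_mul_one a ha, Prod.mk.injEq]
        constructor <;> ring
      rw [hstep, ih (2 * a + 1) (2 * b) (by omega) (by omega), Prod.mk.injEq]
      constructor <;> · simp [pvVal, List.length_cons, pow_succ]; ring
    · by_cases h1 : c = '1'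
      · subst h1
        have hstep : pvStepA (2 * a, 2 * b) '1' = (2 * (2 * a), 2 * (2 * b + 1)) := by
          simp only [pvStepA]
          rw [if_neg h0]
          simp only [if_true]
          simp only [Int.shiftLeft_eq, pow_one, bor_two_mul_one b hb, Prod.mk.injEq]
          constructor <;> ring
        rw [hstep, ih (2 * a) (2 * b + 1) (by omega) (by omega), Prod.mk.injEq]
        constructor <;> · simp [pvVal, List.length_cons, pow_succ]; ring
      · have hstep : pvStepA (2 * a, 2 * b) c = (2 * (2 * a), 2 * (2 * b)) := by
          simp only [pvStepA]
          rw [if_neg h0, if_neg h1]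
          simp only [Int.shiftLeft_eq, pow_one, Prod.mk.injEq]
          constructor <;> ring
        rw [hstep, ih (2 * a) (2 * b) (by omega) (by omega), Prod.mk.injEq]
        constructor <;> · simp [pvVal, h0, h1, List.length_cons, pow_succ]; ring

lemma sumB (c : Char) (l : List Char) (k : Int) (hk : 0 ≤ k) :
    (((PySem.List.enumerate l k).filter (fun p => p.2 == c)).map
      (fun p => (1 : Int) <<< (k + l.length - 1 - p.1).toNat)).sum = pvVal c l := by
  induction l generalizing k with
  | nil => simp [PySem.List.enumerate, pvVal]
  | cons d t ih =>
    have hcons : PySem.List.enumerate (d :: t) k = (k, d) :: PySem.List.enumerate t (k + 1) := by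
      simp [PySem.List.enumerate]
    rw [hcons]
    have hlen : ((d :: t).length : Int) = (t.length : Int) + 1 := by
      push_cast [List.length_cons]; ring
    by_cases hd : d = c
    · rw [List.filter_cons_of_pos (by simp [hd])]
      simp only [List.map_cons, List.sum_cons]
      have harg : (k + ((d :: t).length : Int) - 1 - k) = (t.length : Int) := by
        rw [hlen]; ring
      have hexp : ∀ p : Int × Char, (k + ((d :: t).length : Int) - 1 - p.1) =
          ((k + 1) + (t.length : Int) - 1 - p.1) := by intro p; rw [hlen]; ring
      have hrest : (((PySem.List.enumerate t (k+1)).filter (fun p => p.2 == c)).map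
          (fun p => (1 : Int) <<< (k + ((d :: t).length : Int) - 1 - p.1).toNat)).sum = pvVal c t := by
        rw [show (fun p : Int × Char => (1 : Int) <<< (k + ((d :: t).length : Int) - 1 - p.1).toNat)
            = (fun p : Int × Char => (1 : Int) <<< ((k + 1) + (t.length : Int) - 1 - p.1).toNat) from
          funext fun p => by rw [hexp p]]
        exact ih (k + 1) (by omega)
      rw [harg, hrest]
      simp [pvVal, hd, Int.shiftLeft_eq, Int.toNat_natCast]
    · rw [List.filter_cons_of_neg (by simp [hd])]
      have hexp : ∀ p : Int × Char, (k + ((d :: t).length : Int) - 1 - p.1) =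
          ((k + 1) + (t.length : Int) - 1 - p.1) := by intro p; rw [hlen]; ring
      have hrest : (((PySem.List.enumerate t (k+1)).filter (fun p => p.2 == c)).map
          (fun p => (1 : Int) <<< (k + ((d :: t).length : Int) - 1 - p.1).toNat)).sum = pvVal c t := by
        rw [show (fun p : Int × Char => (1 : Int) <<< (k + ((d :: t).length : Int) - 1 - p.1).toNat)
            = (fun p : Int × Char => (1 : Int) <<< ((k + 1) + (t.length : Int) - 1 - p.1).toNat) from
          funext fun p => by rw [hexp p]]
        exact ih (k + 1) (by omega)
      rw [hrest]
      simp [pvVal, hd]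

lemma shiftRight_two_mul (v : Int) : (2 * v) >>> (1 : Nat) = v := by
  rw [Int.shiftRight_eq_div_pow]
  norm_num

-- ===== VERDICT (by name: the statement is the Claim_ definition above) =====
theorem parse_kb_str_py_spec : Claim_equal_parse_kb_str_py := by
  intro arg _
  unfold Spec_parse_kb_str_py parse_kb_str_py parse_kb_str_py_alt
  have hA := foldA arg.toList 0 0 le_rfl le_rfl
  simp only [mul_zero, zero_mul, zero_add] at hA
  simp only [hA, shiftRight_two_mul]
  have hlen : PySem.Str.len arg = (arg.toList.length : Int) := by
    simp [PySem.Str.len_eq]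
  have hz := sumB '0' arg.toList 0 le_rfl
  have ho := sumB '1' arg.toList 0 le_rfl
  simp only [zero_add] at hz ho
  simp only [hlen]
  rw [← hz, ← ho]
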